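-- pv_equiv track=rewrite | github.com/guia-matthieu/clawfu-skills | skills/seo-tools/keyword-clusterer/scripts/main.py | cluster_by_words
-- ===== SOURCE A (Python) =====
-- from collections import defaultdict
--
-- def cluster_by_words(keywords: list, n_clusters: int) -> dict:
--     """Simple clustering based on common words."""
--     # Extract main topic words (filter common words)
--     stop_words = {'how', 'to', 'the', 'a', 'an', 'for', 'in', 'on', 'with', 'and', 'or', 'is', 'what', 'best'}
--
--     keyword_topics = []
--     for kw in keywords:
--         words = [w.lower() for w in kw.split() if w.lower() not in stop_words and len(w) > 2]
--         keyword_topics.append(words)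
--
--     # Count word frequencies
--     word_freq = defaultdict(int)
--     for words in keyword_topics:
--         for word in words:
--             word_freq[word] += 1
--
--     # Get top words as cluster centers
--     top_words = sorted(word_freq.items(), key=lambda x: x[1], reverse=True)[:n_clusters]
--     cluster_centers = [w[0] for w in top_words]
--
--     # Assign keywords to clusters
--     clusters = defaultdict(list)
--     for kw, words in zip(keywords, keyword_topics):
--         best_cluster = None
--         best_score = 0
--
--         for center in cluster_centers:
--             if center in words:
--                 score = word_freq[center]
--                 if score > best_score:
--                     best_score = score
--                     best_cluster = center
--
--         if best_cluster:
--             clusters[best_cluster].append(kw)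
--         else:
--             clusters['other'].append(kw)
--
--     return dict(clusters)
-- ===== SOURCE B (Python) =====
-- def cluster_by_words(keywords: list, n_clusters: int) -> dict:
--     """Simple clustering based on common words.
--
--     Re-implementation: rank the cluster centers once (center -> rank dict);
--     each keyword then scans only its OWN words and picks the smallest-rank
--     matching center, instead of scanning every center per keyword.
--     """
--     stop_words = {'how', 'to', 'the', 'a', 'an', 'for', 'in', 'on', 'with', 'and', 'or', 'is', 'what', 'best'}
--
--     topics = [[w.lower() for w in kw.split() if w.lower() not in stop_words and len(w) > 2]
--               for kw in keywords]
--
--     freq = {}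
--     for w in (w for ws in topics for w in ws):
--         freq[w] = freq.get(w, 0) + 1
--
--     top = sorted(freq.items(), key=lambda kv: kv[1], reverse=True)[:n_clusters]
--     rank = {w: i for i, (w, _) in enumerate(top)}
--
--     clusters = {}
--     for kw, words in zip(keywords, topics):
--         ranks = [rank[w] for w in words if w in rank]
--         label = top[min(ranks)][0] if ranks else 'other'
--         clusters.setdefault(label, []).append(kw)
--     return clusters
-- ===== Notes on version B (the rewrite author's own statement) =====
-- stated objective: faster
-- what changed: A scans every cluster center for every keyword (membership test of the center in the keyword's word list); B builds a center->rank dict once and each keyword scans only its own words, taking the smallest-rank matching center, which is the same first-center-in-sorted-order A's strictly-greater score comparison selects.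
import Mathlib
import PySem

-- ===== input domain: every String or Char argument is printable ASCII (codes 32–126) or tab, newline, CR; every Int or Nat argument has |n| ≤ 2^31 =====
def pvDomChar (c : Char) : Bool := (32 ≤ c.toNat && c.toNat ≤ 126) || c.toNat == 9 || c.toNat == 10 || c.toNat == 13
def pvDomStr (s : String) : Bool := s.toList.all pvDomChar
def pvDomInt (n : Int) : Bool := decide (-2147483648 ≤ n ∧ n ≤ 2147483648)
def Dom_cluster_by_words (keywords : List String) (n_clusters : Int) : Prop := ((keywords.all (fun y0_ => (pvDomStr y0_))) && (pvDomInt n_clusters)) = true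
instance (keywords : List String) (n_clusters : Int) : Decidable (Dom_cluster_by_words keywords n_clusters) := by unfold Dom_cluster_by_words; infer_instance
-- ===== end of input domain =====

-- B replaces A's per-keyword scan over ALL cluster centers by a center→rank dict built once:
-- each keyword scans only its own words and takes the smallest-rank matching center (objective: faster).

-- ===== PORT A =====
-- shared by both ports: both Pythons compute the stop-word set and the per-keyword topic list
-- with literally the same comprehension  [w.lower() for w in kw.split() if w.lower() not in stop_words and len(w) > 2]
def pvStop : PySem.Set String :=
  PySem.Set.ofList ["how", "to", "the", "a", "an", "for", "in", "on", "with", "and", "or", "is", "what", "best"]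

def pvTopic (kw : String) : List String :=
  ((PySem.Str.split₀ kw).filter (fun w =>
      !(PySem.Set.contains pvStop (PySem.Str.lower w)) && decide (2 < PySem.Str.len w))).map PySem.Str.lower

def cluster_by_words (keywords : List String) (n_clusters : Int) : List (String × List String) :=
  let keyword_topics := keywords.foldl (fun acc kw => acc ++ [pvTopic kw]) []
  -- word_freq = defaultdict(int); word_freq[word] += 1
  let word_freq := keyword_topics.foldl
      (fun d ws => ws.foldl (fun (d : PySem.Dict String Int) w => d.modify w 0 (· + 1)) d)
      PySem.Dict.empty
  let top_words := PySem.List.slice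
      (PySem.List.sorted word_freq.items (fun x => x.2) true) none (some n_clusters)
  let cluster_centers := top_words.map (fun w => w.1)
  let clusters := (keywords.zip keyword_topics).foldl
      (fun (cl : PySem.Dict String (List String)) p =>
        let best := cluster_centers.foldl
            (fun (st : Option String × Int) center =>
              if p.2.contains center then
                let score := word_freq.getD center 0
                if score > st.2 then (some center, score) else st
              else st)
            (none, 0)
        -- `if best_cluster:` — best_cluster, when set, is a word of length > 2, never "",
        -- so Python's truthiness test here is exactly `is not None`
        match best.1 with
        | some c => cl.modify c [] (· ++ [p.1])
        | none => cl.modify "other" [] (· ++ [p.1]))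
      PySem.Dict.empty
  clusters.items

-- ===== PORT B =====
-- rank = {w: i for i, (w, _) in enumerate(top)}
def pvRank (top : List (String × Int)) : PySem.Dict String Int :=
  (PySem.List.enumerate top).foldl (fun d p => d.insert p.2.1 p.1) PySem.Dict.empty

def cluster_by_words_alt (keywords : List String) (n_clusters : Int) : List (String × List String) :=
  let topics := keywords.map pvTopic
  let freq := (topics.flatMap id).foldl
      (fun (d : PySem.Dict String Int) w => d.insert w (d.getD w 0 + 1)) PySem.Dict.empty
  let top := PySem.List.slice
      (PySem.List.sorted freq.items (fun kv => kv.2) true) none (some n_clusters)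
  let rank := pvRank top
  let clusters := (keywords.zip topics).foldl
      (fun (cl : PySem.Dict String (List String)) p =>
        let ranks := (p.2.filter (fun w => rank.contains w)).map (fun w => rank.getD w 0)
        let label := match PySem.List.min? ranks id with
          | some m => (PySem.List.pyGetD top m ("", 0)).1
          | none => "other"
        cl.modify label [] (· ++ [p.1]))
      PySem.Dict.empty
  clusters.items

-- ===== PRECONDITION & SPEC =====
def Spec_cluster_by_words (keywords : List String) (n_clusters : Int) (out : List (String × List String)) : Prop := out = cluster_by_words_alt keywords n_clusters
instance (keywords : List String) (n_clusters : Int) (out : List (String × List String)) : Decidable (Spec_cluster_by_words keywords n_clusters out) := by unfold Spec_cluster_by_words; infer_instance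

-- ===== CLAIM (what is proved, stated in full; the proofs are below) =====
def Claim_equal_cluster_by_words : Prop := ∀ (keywords : List String) (n_clusters : Int), Dom_cluster_by_words keywords n_clusters → Spec_cluster_by_words keywords n_clusters (cluster_by_words keywords n_clusters)

-- ===== LEMMAS AND PROOFS =====

-- A's inner loop keeps its state unchanged once every remaining center's frequency is ≤ the best score
lemma loopA_stop (F : PySem.Dict String Int) (words : List String) :
    ∀ (cs : List String) (st : Option String × Int), (∀ c ∈ cs, F.getD c 0 ≤ st.2) →
    cs.foldl (fun (st : Option String × Int) center =>
        if words.contains center then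
          (if F.getD center 0 > st.2 then (some center, F.getD center 0) else st)
        else st) st = st := by
  intro cs
  induction cs with
  | nil => intro st _; rfl
  | cons c cs ih =>
    intro st h
    have hc : ¬ (F.getD c 0 > st.2) := by have := h c (by simp); omega
    simp only [List.foldl_cons]
    have hbody : (if words.contains c then
        (if F.getD c 0 > st.2 then ((some c : Option String), F.getD c 0) else st)
        else st) = st := by
      by_cases h1 : words.contains c = true
      · rw [if_pos h1, if_neg hc]
      · rw [if_neg h1]
    rw [hbody]
    exact ih st (fun x hx => h x (by simp [hx]))

-- over centers of non-increasing positive frequency, A's loop returns the FIRST center occurring in words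
lemma loopA_eq_find (F : PySem.Dict String Int) (words : List String) :
    ∀ (cs : List String), cs.Pairwise (fun a b => F.getD b 0 ≤ F.getD a 0) →
    (∀ c ∈ cs, 1 ≤ F.getD c 0) →
    (cs.foldl (fun (st : Option String × Int) center =>
        if words.contains center then
          (if F.getD center 0 > st.2 then (some center, F.getD center 0) else st)
        else st) (none, 0)).1
      = cs.find? (fun c => words.contains c) := by
  intro cs
  induction cs with
  | nil => intro _ _; rfl
  | cons c cs ih =>
    intro hp h1
    rcases List.pairwise_cons.mp hp with ⟨hhead, htail⟩
    by_cases hc : words.contains c = true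
    · have hg : F.getD c 0 > (0 : Int) := by have := h1 c (by simp); omega
      rw [List.foldl_cons, if_pos hc, if_pos hg,
        loopA_stop F words cs (some c, F.getD c 0) (fun x hx => hhead x hx),
        List.find?_cons_of_pos (by simpa using hc)]
    · rw [List.foldl_cons, if_neg hc, List.find?_cons_of_neg (by simpa using hc)]
      exact ih htail (fun x hx => h1 x (by simp [hx]))

lemma rank_items (tops : List (String × Int)) (hnd : (tops.map Prod.fst).Nodup) :
    (pvRank tops).items = (PySem.List.enumerate tops).map (fun p => (p.2.1, p.1)) := by
  have hmap : (PySem.List.enumerate tops).map (fun (p : Int × String × Int) => p.2.1)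
      = tops.map Prod.fst := by
    calc (PySem.List.enumerate tops).map (fun (p : Int × String × Int) => p.2.1)
        = ((PySem.List.enumerate tops).map (fun p => p.2)).map Prod.fst := by
          rw [List.map_map]; rfl
      _ = tops.map Prod.fst := by rw [PySem.List.map_snd_enumerate]
  have h := PySem.Dict.items_foldl_insert_fresh (PySem.List.enumerate tops)
      (fun p => p.2.1) (fun p => p.1) PySem.Dict.empty
      (fun a _ => by simp) (by rw [hmap]; exact hnd)
  simpa [pvRank] using h

lemma rank_keys (tops : List (String × Int)) (hnd : (tops.map Prod.fst).Nodup) :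
    (pvRank tops).keys = tops.map Prod.fst := by
  have h1 : (pvRank tops).keys = (pvRank tops).items.map Prod.fst := rfl
  rw [h1, rank_items tops hnd, List.map_map]
  calc (PySem.List.enumerate tops).map (Prod.fst ∘ fun (p : Int × String × Int) => (p.2.1, p.1))
      = ((PySem.List.enumerate tops).map (fun p => p.2)).map Prod.fst := by
        rw [List.map_map]; rfl
    _ = tops.map Prod.fst := by rw [PySem.List.map_snd_enumerate]

lemma rank_getD (tops : List (String × Int)) (hnd : (tops.map Prod.fst).Nodup)
    (k : Nat) (hk : k < tops.length) :
    (pvRank tops).getD tops[k].1 0 = (k : Int) := by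
  apply PySem.Dict.getD_of_mem_items
  · rw [rank_items tops hnd]
    refine List.mem_map.mpr ⟨((k : Int), tops[k]), ?_, by simp⟩
    exact (PySem.List.mem_enumerate_iff tops 0 _).mpr ⟨k, hk, by simp⟩
  · rw [rank_keys tops hnd]; exact hnd

-- the per-keyword labels of A's loop and B's min-rank computation agree
lemma label_eq (F : PySem.Dict String Int) (tops : List (String × Int))
    (hpair : tops.Pairwise (fun p q => q.2 ≤ p.2))
    (hval : ∀ p ∈ tops, F.getD p.1 0 = p.2 ∧ 1 ≤ p.2)
    (hnd : (tops.map Prod.fst).Nodup)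
    (words : List String) :
    (match ((tops.map (fun w => w.1)).foldl
        (fun (st : Option String × Int) center =>
          if words.contains center then
            (if F.getD center 0 > st.2 then (some center, F.getD center 0) else st)
          else st) (none, 0)).1 with
     | some c => c
     | none => "other")
    = (match PySem.List.min? ((words.filter (fun w => (pvRank tops).contains w)).map
          (fun w => (pvRank tops).getD w 0)) id with
       | some m => (PySem.List.pyGetD tops m ("", 0)).1
       | none => "other") := by
  have hp' : (tops.map (fun w => w.1)).Pairwise (fun a b => F.getD b 0 ≤ F.getD a 0) := by
    rw [List.pairwise_map]
    refine hpair.imp_of_mem ?_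
    intro p q hp hq h
    rw [(hval p hp).1, (hval q hq).1]; exact h
  have h1' : ∀ c ∈ tops.map (fun w => w.1), 1 ≤ F.getD c 0 := by
    intro c hc
    rcases List.mem_map.mp hc with ⟨p, hp, rfl⟩
    rw [(hval p hp).1]; exact (hval p hp).2
  rw [loopA_eq_find F words _ hp' h1']
  have hcont : ∀ w, (pvRank tops).contains w = true ↔ w ∈ tops.map Prod.fst := by
    intro w
    rw [PySem.Dict.contains_iff_mem_keys, rank_keys tops hnd]
  cases hfind : (tops.map (fun w => w.1)).find? (fun c => words.contains c) with
  | none =>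
    have hnil : words.filter (fun w => (pvRank tops).contains w) = [] := by
      rw [List.filter_eq_nil_iff]
      intro w hw hcw
      have hwmem : w ∈ tops.map (fun x => x.1) := (hcont w).mp hcw
      exact List.find?_eq_none.mp hfind w hwmem (by simpa using hw)
    rw [hnil]
    have h0 : PySem.List.min? (List.map (fun w => (pvRank tops).getD w 0) []) id = none :=
      (PySem.List.min?_eq_none_iff _ _).mpr rfl
    rw [h0]
  | some c =>
    obtain ⟨hpc, i, hi, hci, hminIdx⟩ := List.find?_eq_some_iff_getElem.mp hfind
    have hi' : i < tops.length := by simpa using hi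
    have hc_top : tops[i].1 = c := by simpa using hci
    have hcw : c ∈ words := by simpa using hpc
    set ranks := (words.filter (fun w => (pvRank tops).contains w)).map
        (fun w => (pvRank tops).getD w 0) with hranks
    have hmemranks : (i : Int) ∈ ranks := by
      refine List.mem_map.mpr ⟨c, List.mem_filter.mpr ⟨hcw, ?_⟩, ?_⟩
      · exact (hcont c).mpr (by rw [← hc_top]; exact List.mem_map.mpr ⟨tops[i], by simp, rfl⟩)
      · rw [← hc_top]; exact rank_getD tops hnd i hi'
    have hlb : ∀ r ∈ ranks, (i : Int) ≤ r := by
      intro r hr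
      rcases List.mem_map.mp hr with ⟨w, hwf, rfl⟩
      rcases List.mem_filter.mp hwf with ⟨hw_words, hw_rank⟩
      rcases List.mem_map.mp ((hcont w).mp hw_rank) with ⟨q, hq, rfl⟩
      rcases List.mem_iff_getElem.mp hq with ⟨k, hk, rfl⟩
      rw [rank_getD tops hnd k hk]
      by_contra hlt
      have hki : k < i := by omega
      have hnk := hminIdx k (by simpa using hki)
      simp at hnk
      exact hnk hw_words
    have hmin : PySem.List.min? ranks id = some ((i : Int)) := by
      cases hm : PySem.List.min? ranks id with
      | none =>
        rw [PySem.List.min?_eq_none_iff] at hm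
        rw [hm] at hmemranks
        simp at hmemranks
      | some m =>
        have hmmem := PySem.List.min?_mem hm
        have h1 := PySem.List.min?_isMin hm (i : Int) hmemranks
        have h2 := hlb m hmmem
        have : m = (i : Int) := le_antisymm (by simpa using h1) h2
        rw [this]
    rw [hmin]
    have hpg : PySem.List.pyGetD tops ((i : Int)) ("", 0) = tops[i] := by
      rw [PySem.List.pyGetD_natCast]
      exact List.getD_eq_getElem tops _ hi'
    simp [hpg, hc_top]

-- a Python [:n] slice with no start is a sublist of the sliced list
lemma slice_to_sublist {α : Type} (xs : List α) (n : Int) :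
    (PySem.List.slice xs none (some n)).Sublist xs := by
  simp only [PySem.List.slice]
  simpa using List.take_sublist _ _

-- A's two-branch dict update is the update at the matched-or-'other' label
lemma match_modify (cl : PySem.Dict String (List String)) (o : Option String) (kw : String) :
    (match o with
     | some c => cl.modify c [] (· ++ [kw])
     | none => cl.modify "other" [] (· ++ [kw]))
    = cl.modify (match o with | some c => c | none => "other") [] (· ++ [kw]) := by
  cases o <;> rfl

lemma ports_eq (keywords : List String) (n_clusters : Int) :
    cluster_by_words keywords n_clusters = cluster_by_words_alt keywords n_clusters := by
  simp only [cluster_by_words, cluster_by_words_alt,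
    PySem.List.foldl_append_singleton_eq_map, List.nil_append, List.flatMap_id,
    ← List.foldl_flatten, ← PySem.Dict.counter_eq_foldl,
    PySem.Dict.foldl_insert_getD_add_one_eq_counter]
  set T := keywords.map pvTopic with hT
  set F := PySem.Dict.counter T.flatten with hF
  set S := PySem.List.sorted F.items (fun x : String × Int => x.2) true with hS
  set tops := PySem.List.slice S none (some n_clusters) with htops
  have hsub : tops.Sublist S := slice_to_sublist _ _
  have hperm : S.Perm F.items := PySem.List.sorted_perm F.items _ true
  have hpair : tops.Pairwise (fun p q => q.2 ≤ p.2) :=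
    (PySem.List.sorted_pairwise_rev F.items (fun x => x.2)).sublist hsub
  have hkeysnd : (F.items.map Prod.fst).Nodup := PySem.Dict.nodup_keys_counter T.flatten
  have hnd : (tops.map Prod.fst).Nodup := by
    refine (hsub.map Prod.fst).nodup ?_
    exact ((hperm.map Prod.fst).nodup_iff).mpr hkeysnd
  have hval : ∀ p ∈ tops, F.getD p.1 0 = p.2 ∧ 1 ≤ p.2 := by
    intro p hp
    have hpi : p ∈ F.items := hperm.subset (hsub.subset hp)
    refine ⟨?_, ?_⟩
    · obtain ⟨k, v⟩ := p
      exact PySem.Dict.getD_of_mem_items F hpi (PySem.Dict.nodup_keys_counter T.flatten) 0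
    · rw [hF, PySem.Dict.items_counter] at hpi
      rcases List.mem_map.mp hpi with ⟨k, hkmem, rfl⟩
      have hkf : k ∈ T.flatten := (PySem.Set.mem_ofList _ _).mp hkmem
      have h1 := List.count_pos_iff.mpr hkf
      show (1:Int) ≤ ((List.count k T.flatten : Nat) : Int)
      exact_mod_cast h1
  congr 1
  apply PySem.List.foldl_congr_mem
  intro acc x _
  rw [match_modify]
  exact congrArg (fun lbl => acc.modify lbl [] (· ++ [x.1])) (label_eq F tops hpair hval hnd x.2)

-- ===== VERDICT (by name: the statement is the Claim_ definition above) =====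
theorem cluster_by_words_spec : Claim_equal_cluster_by_words := by
  intro keywords n_clusters _
  unfold Spec_cluster_by_words
  exact ports_eq keywords n_clusters
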